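-- pv_equiv track=rewrite | github.com/Jgorzitza/hotrodan-assist | app/seo-api/automation/competitor_analyzer.py | _determine_optimal_content_type
-- ===== SOURCE A (Python) =====
-- from typing import Dict, List, Any, Optional, Tuple
--
-- def _determine_optimal_content_type(urls: List[str], keyword: str) -> str:
--     """Determine optimal content type for keyword."""
--
--     # Analyze URL patterns
--     blog_count = sum(1 for url in urls if 'blog' in url.lower())
--     product_count = sum(1 for url in urls if 'product' in url.lower())
--     guide_count = sum(1 for url in urls if 'guide' in url.lower())
--
--     if blog_count > product_count and blog_count > guide_count:
--         return 'blog_post'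
--     elif product_count > blog_count and product_count > guide_count:
--         return 'product_page'
--     elif guide_count > blog_count and guide_count > product_count:
--         return 'guide'
--     else:
--         return 'blog_post'  # Default
-- ===== SOURCE B (Python) =====
-- def _determine_optimal_content_type(urls, keyword):
--     """Determine optimal content type for keyword."""
--     b = p = g = 0
--     for url in urls:
--         u = url.lower()
--         b += 'blog' in u
--         p += 'product' in u
--         g += 'guide' in u
--     ranked = sorted([(b, 'blog_post'), (p, 'product_page'), (g, 'guide')],
--                     key=lambda t: t[0], reverse=True)
--     return ranked[0][1] if ranked[0][0] > ranked[1][0] else 'blog_post'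
-- ===== Notes on version B (the rewrite author's own statement) =====
-- stated objective: alternative
-- what changed: Replaces three separate list scans and a chain of strict pairwise comparisons with a single tallying pass followed by sorting the (count, type) pairs descending and returning the top type only if it strictly beats the runner-up (any top tie falls back to 'blog_post').
import Mathlib
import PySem

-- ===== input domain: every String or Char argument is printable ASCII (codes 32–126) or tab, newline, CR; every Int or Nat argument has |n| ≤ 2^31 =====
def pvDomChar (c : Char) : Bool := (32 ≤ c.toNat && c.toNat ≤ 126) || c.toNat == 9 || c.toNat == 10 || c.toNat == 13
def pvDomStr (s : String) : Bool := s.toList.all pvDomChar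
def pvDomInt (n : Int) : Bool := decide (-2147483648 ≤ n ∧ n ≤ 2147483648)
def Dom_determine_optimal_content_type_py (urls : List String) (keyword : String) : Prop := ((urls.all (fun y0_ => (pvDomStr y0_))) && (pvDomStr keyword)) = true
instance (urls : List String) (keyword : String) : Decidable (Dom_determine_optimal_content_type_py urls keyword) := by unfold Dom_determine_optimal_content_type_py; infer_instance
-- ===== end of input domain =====

-- B replaces A's three scans + strict-comparison chain with one tallying pass and a sort-descending/top-two selection (alternative structure, same cost).

-- ===== PORT A =====
def determine_optimal_content_type_py (urls : List String) (_keyword : String) : String :=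
  let blog_count := (urls.map (fun url => if PySem.Str.isIn "blog" (PySem.Str.lower url) then (1 : Int) else 0)).sum
  let product_count := (urls.map (fun url => if PySem.Str.isIn "product" (PySem.Str.lower url) then (1 : Int) else 0)).sum
  let guide_count := (urls.map (fun url => if PySem.Str.isIn "guide" (PySem.Str.lower url) then (1 : Int) else 0)).sum
  if blog_count > product_count ∧ blog_count > guide_count then "blog_post"
  else if product_count > blog_count ∧ product_count > guide_count then "product_page"
  else if guide_count > blog_count ∧ guide_count > product_count then "guide"
  else "blog_post"

-- ===== PORT B =====
def determine_optimal_content_type_py_alt (urls : List String) (_keyword : String) : String :=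
  -- single pass: b += 'blog' in u; p += 'product' in u; g += 'guide' in u
  let t := urls.foldl (fun (acc : Int × Int × Int) url =>
    let u := PySem.Str.lower url
    (acc.1 + (if PySem.Str.isIn "blog" u then 1 else 0),
     acc.2.1 + (if PySem.Str.isIn "product" u then 1 else 0),
     acc.2.2 + (if PySem.Str.isIn "guide" u then 1 else 0))) (0, 0, 0)
  -- ranked = sorted([(b,'blog_post'),(p,'product_page'),(g,'guide')], key=count, reverse=True)
  let ranked := PySem.List.sorted [(t.1, "blog_post"), (t.2.1, "product_page"), (t.2.2, "guide")] (fun tc => tc.1) true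
  -- ranked[0], ranked[1]: the list always has three elements, so the match's catch-all is unreachable
  match ranked with
  | r0 :: r1 :: _ => if r0.1 > r1.1 then r0.2 else "blog_post"
  | _ => "blog_post"

-- ===== PRECONDITION & SPEC =====
def Spec_determine_optimal_content_type_py (urls : List String) (keyword : String) (out : String) : Prop := out = determine_optimal_content_type_py_alt urls keyword
instance (urls : List String) (keyword : String) (out : String) : Decidable (Spec_determine_optimal_content_type_py urls keyword out) := by unfold Spec_determine_optimal_content_type_py; infer_instance

-- ===== CLAIM =====
def Claim_equal_determine_optimal_content_type_py : Prop := ∀ (urls : List String) (keyword : String), Dom_determine_optimal_content_type_py urls keyword → Spec_determine_optimal_content_type_py urls keyword (determine_optimal_content_type_py urls keyword)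

-- ===== LEMMAS AND PROOFS =====

-- the single tallying pass computes the three keyword counts
theorem pv_tally (urls : List String) (b p g : Int) :
    urls.foldl (fun (acc : Int × Int × Int) url =>
      let u := PySem.Str.lower url
      (acc.1 + (if PySem.Str.isIn "blog" u then 1 else 0),
       acc.2.1 + (if PySem.Str.isIn "product" u then 1 else 0),
       acc.2.2 + (if PySem.Str.isIn "guide" u then 1 else 0))) (b, p, g)
    = (b + (urls.countP (fun url => PySem.Str.isIn "blog" (PySem.Str.lower url)) : Int),
       p + (urls.countP (fun url => PySem.Str.isIn "product" (PySem.Str.lower url)) : Int),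
       g + (urls.countP (fun url => PySem.Str.isIn "guide" (PySem.Str.lower url)) : Int)) := by
  induction urls generalizing b p g with
  | nil => simp
  | cons u t ih =>
    simp only [List.foldl_cons, ih, List.countP_cons, Prod.mk.injEq]
    refine ⟨?_, ?_, ?_⟩ <;> push_cast <;> split_ifs <;> ring

-- A's strict-comparison chain equals B's sort-descending/top-two selection, for any three counts
theorem pv_sel (B P G : Int) :
    (if B > P ∧ B > G then "blog_post"
     else if P > B ∧ P > G then "product_page"
     else if G > B ∧ G > P then "guide" else "blog_post")
    = (match PySem.List.sorted [(B, "blog_post"), (P, "product_page"), (G, "guide")] (fun tc => tc.1) true with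
       | r0 :: r1 :: _ => if r0.1 > r1.1 then r0.2 else "blog_post"
       | _ => "blog_post") := by
  simp only [PySem.List.sorted]
  rcases lt_trichotomy B P with h1 | h1 | h1 <;> rcases lt_trichotomy B G with h2 | h2 | h2 <;>
    rcases lt_trichotomy P G with h3 | h3 | h3 <;>
    all_goals (repeat' first
      | rfl
      | omega
      | (simp_all [PySem.List.insertBy])
      | split_ifs)

-- ===== VERDICT =====
theorem determine_optimal_content_type_py_spec : Claim_equal_determine_optimal_content_type_py := by
  intro urls keyword _
  unfold Spec_determine_optimal_content_type_py
  unfold determine_optimal_content_type_py determine_optimal_content_type_py_alt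
  simp only [pv_tally, zero_add, PySem.List.sum_map_ite_one_zero]
  exact pv_sel _ _ _
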